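-- pv_equiv track=rewrite | github.com/rayguo233/leetcode-attempts | python/1414. [M] Find the Minimum Number of Fibonacci Numbers Whose Sum Is K.py | findMinFibonacciNumbers
-- ===== SOURCE A (Python) =====
-- def findMinFibonacciNumbers(k: int) -> int:
--     fib_seq = [1]
--     a, b = 1, 1
--     while a + b <= k:
--         a, b = b, a + b
--         fib_seq.append(b)
--     fib_set = set(fib_seq)
--     steps = 1
--     if k in fib_set:
--         return steps
--     needs = {k}
--     visited = set()
--     while True:
--         steps += 1
--         next_needs = set()
--         for need in needs:
--             for fib_num in fib_seq:
--                 next_need = need - fib_num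
--                 if next_need <= 0 or next_need in visited:
--                     continue
--                 if next_need in fib_set:
--                     return steps
--                 visited.add(next_need)
--                 next_needs.add(next_need)
--         needs = next_needs
-- ===== SOURCE B (Python) =====
-- def findMinFibonacciNumbers(k: int) -> int:
--     count = 0
--     while k > 0:
--         a, b = 1, 1
--         while a + b <= k:
--             a, b = b, a + b
--         k -= b
--         count += 1
--     return count
-- ===== Notes on version B (the rewrite author's own statement) =====
-- stated objective: faster
-- what changed: Replaced A's level-by-level BFS over ever-growing sets of residuals with the classical greedy loop that repeatedly subtracts the largest Fibonacci number not exceeding the remainder (provably optimal for Fibonacci sums).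
-- outside the precondition, e.g. on findMinFibonacciNumbers(0): A does not finish within the time limit, B returns 0
import Mathlib
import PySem

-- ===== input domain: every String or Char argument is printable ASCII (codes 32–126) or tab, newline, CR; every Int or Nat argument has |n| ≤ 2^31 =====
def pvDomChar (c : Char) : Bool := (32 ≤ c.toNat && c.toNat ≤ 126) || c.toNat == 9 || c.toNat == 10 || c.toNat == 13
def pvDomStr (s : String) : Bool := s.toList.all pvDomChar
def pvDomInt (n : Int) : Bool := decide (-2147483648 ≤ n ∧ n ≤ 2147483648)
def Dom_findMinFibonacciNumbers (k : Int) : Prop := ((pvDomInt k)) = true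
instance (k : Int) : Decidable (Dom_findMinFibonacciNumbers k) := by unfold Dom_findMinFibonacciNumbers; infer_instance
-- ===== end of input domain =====

-- B replaces A's level-by-level BFS over residual sets with the classical greedy loop
-- (repeatedly subtract the largest Fibonacci number ≤ remainder), an asymptotically faster exact algorithm.

-- ===== PORT A =====
-- while a + b <= k: a, b = b, a + b; fib_seq.append(b)   (fuel-driven: fuel bounds the iteration count of the Python while loop)
def fibSeqLoop (k : Int) : Int → Int → List Int → Nat → List Int
  | _, _, seq, 0 => seq
  | a, b, seq, fuel + 1 =>
    if a + b ≤ k then fibSeqLoop k b (a + b) (seq ++ [a + b]) fuel else seq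

-- inner `for fib_num in fib_seq` loop of A; `none` = the `return steps` was hit
def innerA (fibSet : PySem.Set Int) (need : Int) :
    List Int → PySem.Set Int → PySem.Set Int → Option (PySem.Set Int × PySem.Set Int)
  | [], visited, nextNeeds => some (visited, nextNeeds)
  | f :: fs, visited, nextNeeds =>
    if need - f ≤ 0 ∨ (need - f) ∈ visited then innerA fibSet need fs visited nextNeeds
    else if (need - f) ∈ fibSet then none
    else innerA fibSet need fs (PySem.Set.add visited (need - f)) (PySem.Set.add nextNeeds (need - f))

-- outer `for need in needs` loop of A
def outerA (fibSeq : List Int) (fibSet : PySem.Set Int) :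
    List Int → PySem.Set Int → PySem.Set Int → Option (PySem.Set Int × PySem.Set Int)
  | [], visited, nextNeeds => some (visited, nextNeeds)
  | need :: rest, visited, nextNeeds =>
    match innerA fibSet need fibSeq visited nextNeeds with
    | none => none
    | some (v, nn) => outerA fibSeq fibSet rest v nn

-- `while True` BFS loop of A (fuel-driven; fuel never runs out on admitted inputs, see the proofs)
def bfsA (fibSeq : List Int) (fibSet : PySem.Set Int) :
    PySem.Set Int → PySem.Set Int → Int → Nat → Int
  | _, _, _, 0 => 0
  | needs, visited, steps, fuel + 1 =>
    match outerA fibSeq fibSet needs visited PySem.Set.empty with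
    | none => steps + 1
    | some (v, nn) => bfsA fibSeq fibSet nn v (steps + 1) fuel

def findMinFibonacciNumbers (k : Int) : Int :=
  let fibSeq := fibSeqLoop k 1 1 [1] k.toNat
  let fibSet : PySem.Set Int := PySem.Set.ofList fibSeq
  if k ∈ fibSet then 1
  else bfsA fibSeq fibSet (PySem.Set.ofList [k]) PySem.Set.empty 1 (k.toNat + 1)

-- ===== PORT B =====
-- inner `while a + b <= k` loop of B: ends with b = largest Fibonacci number ≤ k (for k ≥ 1)
def fibInner (k : Int) : Int → Int → Nat → Int
  | _, b, 0 => b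
  | a, b, fuel + 1 => if a + b ≤ k then fibInner k b (a + b) fuel else b

-- outer `while k > 0` loop of B
def greedyLoop : Int → Int → Nat → Int
  | _, count, 0 => count
  | k, count, fuel + 1 =>
    if 0 < k then greedyLoop (k - fibInner k 1 1 k.toNat) (count + 1) fuel else count

def findMinFibonacciNumbers_alt (k : Int) : Int := greedyLoop k 0 (k.toNat + 1)

-- ===== PRECONDITION & SPEC =====
-- Pre_ excludes k ≤ 0, on which A's BFS loop never terminates (it loops forever); B returns 0 there.
def Pre_findMinFibonacciNumbers (k : Int) : Prop := 1 ≤ k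
instance (k : Int) : Decidable (Pre_findMinFibonacciNumbers k) := by
  unfold Pre_findMinFibonacciNumbers; infer_instance
def pvWitness_findMinFibonacciNumbers : Int := 19

def Spec_findMinFibonacciNumbers (k : Int) (out : Int) : Prop := out = findMinFibonacciNumbers_alt k
instance (k : Int) (out : Int) : Decidable (Spec_findMinFibonacciNumbers k out) := by
  unfold Spec_findMinFibonacciNumbers; infer_instance

-- ===== CLAIM (what is proved, stated in full; the proofs are below) =====
def Claim_equal_findMinFibonacciNumbers : Prop :=
  ∀ (k : Int), Dom_findMinFibonacciNumbers k → Pre_findMinFibonacciNumbers k →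
    Spec_findMinFibonacciNumbers k (findMinFibonacciNumbers k)

-- ===== LEMMAS AND PROOFS =====

-- The Fibonacci values both programs use: 1, 2, 3, 5, 8, …
def myfib (j : Nat) : Nat := Nat.fib (j + 2)

theorem myfib_pos (j : Nat) : 1 ≤ myfib j := by
  unfold myfib; exact Nat.fib_pos.mpr (by omega)

theorem myfib_mono {i j : Nat} (h : i ≤ j) : myfib i ≤ myfib j :=
  Nat.fib_mono (by omega)

theorem myfib_lt_succ (j : Nat) : myfib j < myfib (j + 1) := by
  have := Nat.fib_lt_fib_succ (n := j + 2) (by omega)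
  simpa [myfib] using this

theorem myfib_add_two (j : Nat) : myfib (j + 2) = myfib j + myfib (j + 1) := by
  simp [myfib, Nat.fib_add_two]

theorem lt_myfib (j : Nat) : j + 1 ≤ myfib j := by
  induction j with
  | zero => decide
  | succ n ih =>
    have := myfib_lt_succ n
    omega

-- index of the largest Fibonacci value ≤ n (n ≥ 1)
def Mx (n : Nat) : Nat := Nat.findGreatest (fun j => myfib j ≤ n) n

theorem myfib_Mx_le {n : Nat} (h : 1 ≤ n) : myfib (Mx n) ≤ n := by
  unfold Mx
  exact Nat.findGreatest_spec (P := fun j => myfib j ≤ n) (show 0 ≤ n by omega)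
    (le_trans (by decide) h)

theorem myfib_le_Mx {n j : Nat} (_h : 1 ≤ n) (hj : myfib j ≤ n) : myfib j ≤ myfib (Mx n) := by
  by_cases hle : j ≤ Mx n
  · exact myfib_mono hle
  · exfalso
    have hjn : j ≤ n := by have := lt_myfib j; omega
    exact Nat.findGreatest_is_greatest (P := fun j => myfib j ≤ n) (show Mx n < j by omega) hjn hj

theorem Mx_lt {n j : Nat} (h : 1 ≤ n) (hj : n < myfib j) : Mx n < j := by
  by_contra hle
  have h1 : myfib j ≤ myfib (Mx n) := myfib_mono (by omega)
  have h2 : myfib (Mx n) ≤ n := myfib_Mx_le h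
  omega

-- spec-level greedy count
def gspec (n : Nat) : Nat :=
  if n = 0 then 0 else 1 + gspec (n - myfib (Mx n))
termination_by n
decreasing_by
  have h1 : 1 ≤ myfib (Mx n) := myfib_pos _
  omega

theorem gspec_zero : gspec 0 = 0 := by simp [gspec]

theorem gspec_eq {n : Nat} (h : 1 ≤ n) : gspec n = 1 + gspec (n - myfib (Mx n)) := by
  rw [gspec]; simp only [if_neg (show ¬ n = 0 by omega)]

theorem gspec_pos {n : Nat} (h : 1 ≤ n) : 1 ≤ gspec n := by
  rw [gspec_eq h]; omega

theorem gspec_le_self (n : Nat) : gspec n ≤ n := by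
  induction n using Nat.strong_induction_on with
  | _ n ih =>
    rcases Nat.eq_zero_or_pos n with h | h
    · simp [h, gspec_zero]
    · rw [gspec_eq h]
      have hf : 1 ≤ myfib (Mx n) := myfib_pos _
      have := ih (n - myfib (Mx n)) (by omega)
      omega

theorem gspec_myfib (j : Nat) : gspec (myfib j) = 1 := by
  have h1 : 1 ≤ myfib j := myfib_pos j
  have h2 : myfib (Mx (myfib j)) ≤ myfib j := myfib_Mx_le h1
  have h3 : myfib j ≤ myfib (Mx (myfib j)) := myfib_le_Mx h1 (le_refl _)
  rw [gspec_eq h1]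
  have : myfib j - myfib (Mx (myfib j)) = 0 := by omega
  rw [this, gspec_zero]

theorem gspec_eq_one {n : Nat} (h : gspec n = 1) : ∃ j, n = myfib j := by
  have hn : 1 ≤ n := by
    by_contra hc
    have : n = 0 := by omega
    rw [this, gspec_zero] at h; omega
  rw [gspec_eq hn] at h
  have h0 : gspec (n - myfib (Mx n)) = 0 := by omega
  have hz : n - myfib (Mx n) = 0 := by
    by_contra hc
    have := gspec_pos (n := n - myfib (Mx n)) (by omega)
    omega
  have := myfib_Mx_le hn
  exact ⟨Mx n, by omega⟩

-- representations: n as a sum of exactly m Fibonacci values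
def repsN (m n : Nat) : Prop := ∃ L : List Nat, L.length = m ∧ (L.map myfib).sum = n

theorem repsN_gspec (n : Nat) : repsN (gspec n) n := by
  induction n using Nat.strong_induction_on with
  | _ n ih =>
    rcases Nat.eq_zero_or_pos n with h | h
    · exact ⟨[], by simp [h, gspec_zero]⟩
    · have hf1 : 1 ≤ myfib (Mx n) := myfib_pos _
      have hfn : myfib (Mx n) ≤ n := myfib_Mx_le h
      obtain ⟨L, hlen, hsum⟩ := ih (n - myfib (Mx n)) (by omega)
      refine ⟨Mx n :: L, ?_, ?_⟩
      · simp [hlen, gspec_eq h]; omega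
      · simp [hsum]; omega

-- ===== greedy optimality (Zeckendorf-style rewriting argument) =====

theorem sum_sq_le (s : Multiset Nat) : (s.map (fun j => j * j)).sum ≤ s.sum * s.sum := by
  induction s using Multiset.induction_on with
  | empty => simp
  | cons a t ih =>
    simp only [Multiset.map_cons, Multiset.sum_cons]
    nlinarith [ih, Nat.zero_le (a * t.sum)]

-- sum bound for a duplicate-free, adjacency-free set of indices all ≤ M
theorem zsum_bound : ∀ (M : Nat) (s : Multiset Nat), (∀ j, s.count j ≤ 1) →
    (¬ ∃ j, j ∈ s ∧ j + 1 ∈ s) → (∀ x ∈ s, x ≤ M) →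
    (s.map myfib).sum ≤ myfib (M + 1) - 1 := by
  intro M
  induction M using Nat.strong_induction_on with
  | _ M ih =>
    intro s hc hna hb
    by_cases hM : M ∈ s
    · obtain ⟨t, rfl⟩ := Multiset.exists_cons_of_mem hM
      have htc : ∀ j, t.count j ≤ 1 := by
        intro j
        have := hc j
        have := Multiset.count_cons j M t
        simp only [Multiset.count_cons] at this
        have h2 := hc j
        rw [Multiset.count_cons] at h2
        omega
      have htM : M ∉ t := by
        intro hmem
        have := hc M
        rw [Multiset.count_cons_self] at this
        have := Multiset.count_pos.mpr hmem
        omega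
      have htM1 : M = 0 ∨ (M - 1) ∉ t := by
        rcases Nat.eq_zero_or_pos M with h0 | h0
        · exact Or.inl h0
        · refine Or.inr ?_
          intro hmem
          exact hna ⟨M - 1, Multiset.mem_cons_of_mem hmem,
            by rw [Nat.sub_add_cancel h0]; exact Multiset.mem_cons_self _ _⟩
      rcases Nat.lt_or_ge M 2 with hMlt | hMge
      · -- M = 0 or 1 : t must be empty
        have ht0 : t = 0 := by
          rw [Multiset.eq_zero_iff_forall_notMem]
          intro x hx
          have hxM : x ≤ M := hb x (Multiset.mem_cons_of_mem hx)
          interval_cases M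
          · have hx0 : x = 0 := by omega
            exact htM (hx0 ▸ hx)
          · rcases htM1 with h | h
            · omega
            · norm_num at h
              have hx0 : x ≠ 0 := fun hx0 => h (hx0 ▸ hx)
              have hx1 : x ≠ 1 := fun hx1 => htM (hx1 ▸ hx)
              omega
        subst ht0
        interval_cases M <;> decide
      · -- M ≥ 2 : elements of t are ≤ M - 2
        have htb : ∀ x ∈ t, x ≤ M - 2 := by
          intro x hx
          have hxM : x ≤ M := hb x (Multiset.mem_cons_of_mem hx)
          have hx1 : x ≠ M := fun h => htM (h ▸ hx)
          have hx2 : x ≠ M - 1 := by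
            intro h
            rcases htM1 with h0 | h0 <;> [omega; exact h0 (h ▸ hx)]
          omega
        have hna' : ¬ ∃ j, j ∈ t ∧ j + 1 ∈ t := by
          rintro ⟨j, hj, hj1⟩
          exact hna ⟨j, Multiset.mem_cons_of_mem hj, Multiset.mem_cons_of_mem hj1⟩
        have hrec := ih (M - 2) (by omega) t htc hna' htb
        have hadd : myfib M = myfib (M - 2) + myfib (M - 1) := by
          have := myfib_add_two (M - 2)
          have h1 : M - 2 + 2 = M := by omega
          have h2 : M - 2 + 1 = M - 1 := by omega
          rw [h1, h2] at this
          exact this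
        have hadd2 : myfib (M + 1) = myfib (M - 1) + myfib M := by
          have := myfib_add_two (M - 1)
          have h1 : M - 1 + 2 = M + 1 := by omega
          have h2 : M - 1 + 1 = M := by omega
          rw [h1, h2] at this
          exact this
        have hfp := myfib_pos (M - 1)
        have h3 : myfib (M - 2 + 1) = myfib (M - 1) := by
          congr 1
          omega
        rw [h3] at hrec
        simp only [Multiset.map_cons, Multiset.sum_cons]
        omega
    · -- M ∉ s
      rcases Nat.eq_zero_or_pos M with h0 | h0
      · have hs0 : s = 0 := by
          rw [Multiset.eq_zero_iff_forall_notMem]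
          intro x hx
          have hxb := hb x hx
          have hx0 : x = M := by omega
          exact hM (hx0 ▸ hx)
        subst hs0; simp
      · have hb' : ∀ x ∈ s, x ≤ M - 1 := by
          intro x hx
          have := hb x hx
          have : x ≠ M := fun h => hM (h ▸ hx)
          omega
        have hrec := ih (M - 1) (by omega) s hc hna hb'
        have h1 : myfib (M - 1 + 1) = myfib M := by congr 1; omega
        rw [h1] at hrec
        have := myfib_mono (show M ≤ M + 1 by omega)
        omega

-- largest Fibonacci value below the next one is found by Mx
theorem myfib_Mx_eq {M n : Nat} (h1 : myfib M ≤ n) (h2 : n < myfib (M + 1)) :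
    myfib (Mx n) = myfib M := by
  have hn1 : 1 ≤ n := le_trans (myfib_pos M) h1
  have hge : myfib M ≤ myfib (Mx n) := myfib_le_Mx hn1 h1
  have hlt : Mx n < M + 1 := Mx_lt hn1 h2
  have := myfib_mono (show Mx n ≤ M by omega)
  omega

-- any multiset of Fibonacci indices needs at least `gspec` of its sum many elements
theorem zmin (s : Multiset Nat) : gspec ((s.map myfib).sum) ≤ Multiset.card s := by
  by_cases hadj : ∃ j, j ∈ s ∧ j + 1 ∈ s
  · obtain ⟨j, hj, hj1⟩ := hadj
    obtain ⟨t, rfl⟩ := Multiset.exists_cons_of_mem hj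
    have hj1t : j + 1 ∈ t := by
      rcases Multiset.mem_cons.mp hj1 with h | h
      · omega
      · exact h
    obtain ⟨u, rfl⟩ := Multiset.exists_cons_of_mem hj1t
    have hrec := zmin ((j + 2) ::ₘ u)
    have hsum : ((((j + 2) ::ₘ u).map myfib).sum) = (((j ::ₘ (j + 1) ::ₘ u).map myfib).sum) := by
      simp only [Multiset.map_cons, Multiset.sum_cons, myfib_add_two]
      omega
    rw [hsum] at hrec
    simp only [Multiset.card_cons] at hrec ⊢
    omega
  · by_cases hdup : ∃ j, 2 ≤ s.count j
    · obtain ⟨j, hcj⟩ := hdup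
      have hj : j ∈ s := Multiset.count_pos.mp (by omega)
      obtain ⟨t, rfl⟩ := Multiset.exists_cons_of_mem hj
      have hjt : j ∈ t := by
        rw [Multiset.count_cons_self] at hcj
        exact Multiset.count_pos.mp (by omega)
      obtain ⟨u, rfl⟩ := Multiset.exists_cons_of_mem hjt
      rcases Nat.lt_or_ge j 2 with hj2 | hj2
      · interval_cases j
        · -- 0,0 → 1
          have hrec := zmin ((1 : Nat) ::ₘ u)
          have hsum : (((1 : Nat) ::ₘ u).map myfib).sum = (((0 : Nat) ::ₘ (0 : Nat) ::ₘ u).map myfib).sum := by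
            simp only [Multiset.map_cons, Multiset.sum_cons]
            have : myfib 1 = myfib 0 + myfib 0 := by decide
            omega
          rw [hsum] at hrec
          simp only [Multiset.card_cons] at hrec ⊢
          omega
        · -- 1,1 → 2,0
          have hrec := zmin ((2 : Nat) ::ₘ (0 : Nat) ::ₘ u)
          have hsum : (((2 : Nat) ::ₘ (0 : Nat) ::ₘ u).map myfib).sum = (((1 : Nat) ::ₘ (1 : Nat) ::ₘ u).map myfib).sum := by
            simp only [Multiset.map_cons, Multiset.sum_cons]
            have : myfib 2 + myfib 0 = myfib 1 + myfib 1 := by decide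
            omega
          rw [hsum] at hrec
          simp only [Multiset.card_cons] at hrec ⊢
          omega
      · -- j, j → j+1, j-2
        have hrec := zmin ((j + 1) ::ₘ (j - 2) ::ₘ u)
        have hsum : (((j + 1) ::ₘ (j - 2) ::ₘ u).map myfib).sum = ((j ::ₘ j ::ₘ u).map myfib).sum := by
          simp only [Multiset.map_cons, Multiset.sum_cons]
          have e1 : myfib j = myfib (j - 2) + myfib (j - 1) := by
            have h := myfib_add_two (j - 2)
            have h1 : j - 2 + 2 = j := by omega
            have h2 : j - 2 + 1 = j - 1 := by omega
            rw [h1, h2] at h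
            exact h
          have e2 : myfib (j + 1) = myfib (j - 1) + myfib j := by
            have h := myfib_add_two (j - 1)
            have h1 : j - 1 + 2 = j + 1 := by omega
            have h2 : j - 1 + 1 = j := by omega
            rw [h1, h2] at h
            exact h
          omega
        rw [hsum] at hrec
        simp only [Multiset.card_cons] at hrec ⊢
        omega
    · -- no duplicates, no adjacent indices: Zeckendorf form
      by_cases hs0 : s = 0
      · subst hs0; simp [gspec_zero]
      · obtain ⟨M, hM, hmax⟩ := Multiset.exists_max_image (fun z => z) hs0
        obtain ⟨t, rfl⟩ := Multiset.exists_cons_of_mem hM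
        have hcle : ∀ j, Multiset.count j (M ::ₘ t) ≤ 1 := by
          intro j
          by_contra hc
          exact hdup ⟨j, by omega⟩
        have htM : M ∉ t := by
          intro hmem
          have h1 := hcle M
          rw [Multiset.count_cons_self] at h1
          have := Multiset.count_pos.mpr hmem
          omega
        rcases Nat.lt_or_ge M 2 with hM2 | hM2
        · -- M = 0 or 1 forces t = 0
          have ht0 : t = 0 := by
            rw [Multiset.eq_zero_iff_forall_notMem]
            intro x hx
            have hxM : x ≤ M := hmax x (Multiset.mem_cons_of_mem hx)
            have hxne : x ≠ M := fun h => htM (h ▸ hx)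
            have hx0 : x = 0 := by omega
            have hM1 : M = 1 := by omega
            exact hadj ⟨0, Multiset.mem_cons_of_mem (hx0 ▸ hx), by
              rw [show (0 : Nat) + 1 = M from by omega]
              exact Multiset.mem_cons_self _ _⟩
          subst ht0
          simp only [Multiset.map_cons, Multiset.map_zero, Multiset.sum_cons,
            Multiset.sum_zero, Nat.add_zero, Multiset.card_cons, Multiset.card_zero]
          rw [gspec_myfib]
        · -- M ≥ 2 : t's elements are ≤ M - 2
          have htb : ∀ x ∈ t, x ≤ M - 2 := by
            intro x hx
            have hxM : x ≤ M := hmax x (Multiset.mem_cons_of_mem hx)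
            have hxne : x ≠ M := fun h => htM (h ▸ hx)
            have hxne1 : x ≠ M - 1 := by
              intro h
              refine hadj ⟨M - 1, Multiset.mem_cons_of_mem (h ▸ hx), ?_⟩
              rw [show M - 1 + 1 = M from by omega]
              exact Multiset.mem_cons_self _ _
            omega
          have hsumt := zsum_bound (M - 2) t
            (by
              intro j
              have := hcle j
              rw [Multiset.count_cons] at this
              omega)
            (by
              rintro ⟨j, hj, hj1⟩
              exact hadj ⟨j, Multiset.mem_cons_of_mem hj, Multiset.mem_cons_of_mem hj1⟩)
            htb
          rw [show M - 2 + 1 = M - 1 from by omega] at hsumt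
          have hadd2 : myfib (M + 1) = myfib (M - 1) + myfib M := by
            have h := myfib_add_two (M - 1)
            have h1 : M - 1 + 2 = M + 1 := by omega
            have h2 : M - 1 + 1 = M := by omega
            rw [h1, h2] at h
            exact h
          have hfp := myfib_pos (M - 1)
          simp only [Multiset.map_cons, Multiset.sum_cons, Multiset.card_cons]
          set T := (t.map myfib).sum with hT
          have hlow : myfib M ≤ myfib M + T := by omega
          have hhigh : myfib M + T < myfib (M + 1) := by omega
          have hMx := myfib_Mx_eq hlow hhigh
          rw [gspec_eq (le_trans (myfib_pos M) hlow), hMx,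
            show myfib M + T - myfib M = T from by omega]
          have hrec : gspec T ≤ t.card := by rw [hT]; exact zmin t
          omega
termination_by (Multiset.card s, s.sum, s.sum * s.sum - (s.map (fun j => j * j)).sum)
decreasing_by
  all_goals subst_vars
  all_goals
    first
    | -- card decreases
      (refine Prod.Lex.left _ _ ?_
       simp [Multiset.card_cons]
       done)
    | -- {j,j} → {j+1, j-2} (j ≥ 2): card equal, index-sum decreases
      (refine Prod.Lex.right' _ (by simp [Multiset.card_cons]) ?_
       refine Prod.Lex.left _ _ ?_
       simp only [Multiset.sum_cons]
       omega)
    | -- {1,1} → {2,0}: card and index-sum equal, square-gap decreases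
      (try (have hj1 : j = 1 := by omega
            subst hj1)
       refine Prod.Lex.right' _ (by simp [Multiset.card_cons]) ?_
       refine Prod.Lex.right' _ (by simp [Multiset.sum_cons]; omega) ?_
       have h1 := sum_sq_le u
       have hC : ((2 : Nat) ::ₘ (0 : Nat) ::ₘ u).sum = ((1 : Nat) ::ₘ (1 : Nat) ::ₘ u).sum := by
         simp only [Multiset.sum_cons]
         omega
       rw [hC]
       apply Nat.sub_lt_sub_left
       · simp only [Multiset.map_cons, Multiset.sum_cons]
         nlinarith [h1, Nat.zero_le u.sum]
       · simp only [Multiset.map_cons, Multiset.sum_cons]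
         omega)

theorem gspec_min {m n : Nat} (h : repsN m n) : gspec n ≤ m := by
  obtain ⟨L, hlen, hsum⟩ := h
  have := zmin (↑L : Multiset Nat)
  simpa [hlen, hsum] using this

-- ===== the greedy chain =====

def X (n : Nat) : Nat → Nat
  | 0 => n
  | t + 1 => X n t - myfib (Mx (X n t))

theorem gspec_X {n : Nat} : ∀ t, t ≤ gspec n → gspec (X n t) = gspec n - t := by
  intro t
  induction t with
  | zero => intro _; simp [X]
  | succ t ih =>
    intro ht
    have hX := ih (by omega)
    have hpos : 1 ≤ X n t := by
      by_contra hc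
      have h0 : X n t = 0 := by omega
      rw [h0, gspec_zero] at hX
      omega
    have := gspec_eq hpos
    show gspec (X n t - myfib (Mx (X n t))) = gspec n - (t + 1)
    omega

theorem X_pos {n t : Nat} (h : t + 1 ≤ gspec n) : 1 ≤ X n t := by
  have hX := gspec_X (n := n) t (by omega)
  by_contra hc
  have h0 : X n t = 0 := by omega
  rw [h0, gspec_zero] at hX
  omega

theorem X_le {n : Nat} : ∀ t, X n t ≤ n := by
  intro t
  induction t with
  | zero => simp [X]
  | succ t ih =>
    show X n t - myfib (Mx (X n t)) ≤ n
    omega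

theorem repsN_X {n t : Nat} (h : t ≤ gspec n) : repsN (gspec n - t) (X n t) := by
  have := repsN_gspec (X n t)
  rwa [gspec_X t h] at this

-- ===== port B = gspec =====

theorem fibInner_eq : ∀ (fuel i n : Nat), 1 ≤ n → Nat.fib (i + 2) ≤ n →
    n - Nat.fib (i + 2) ≤ fuel →
    fibInner (n : Int) (Nat.fib (i + 1) : Int) (Nat.fib (i + 2) : Int) fuel = (myfib (Mx n) : Int) := by
  intro fuel
  induction fuel with
  | zero =>
    intro i n h1 h2 h3
    have heq : Nat.fib (i + 2) = n := by omega
    have hmx : myfib (Mx n) = myfib i := by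
      refine myfib_Mx_eq ?_ ?_
      · show myfib i ≤ n
        unfold myfib
        omega
      · have := myfib_lt_succ i
        unfold myfib at this ⊢
        omega
    show ((Nat.fib (i + 2) : Nat) : Int) = _
    show ((myfib i : Nat) : Int) = ((myfib (Mx n) : Nat) : Int)
    exact_mod_cast hmx.symm
  | succ fuel ih =>
    intro i n h1 h2 h3
    show (if (Nat.fib (i + 1) : Int) + (Nat.fib (i + 2) : Int) ≤ (n : Int) then _ else _) = _
    have hfib3 : Nat.fib (i + 1) + Nat.fib (i + 2) = Nat.fib (i + 3) :=
      (Nat.fib_add_two (n := i + 1)).symm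
    by_cases hc : Nat.fib (i + 3) ≤ n
    · rw [if_pos (by exact_mod_cast (by omega : Nat.fib (i + 1) + Nat.fib (i + 2) ≤ n))]
      have hcast : (Nat.fib (i + 1) : Int) + (Nat.fib (i + 2) : Int) = (Nat.fib (i + 1 + 2) : Int) := by
        rw [show i + 1 + 2 = i + 3 from rfl]
        exact_mod_cast hfib3
      rw [hcast]
      refine ih (i + 1) n h1 (by rw [show i + 1 + 2 = i + 3 from rfl]; exact hc) ?_
      have hp : 1 ≤ Nat.fib (i + 1) := Nat.fib_pos.mpr (by omega)
      have he : Nat.fib (i + 1 + 2) = Nat.fib (i + 1) + Nat.fib (i + 2) := Nat.fib_add_two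
      omega
    · rw [if_neg (by exact_mod_cast (by omega : ¬ (Nat.fib (i + 1) + Nat.fib (i + 2) ≤ n)))]
      have hmx : myfib (Mx n) = myfib i := by
        refine myfib_Mx_eq ?_ ?_
        · show myfib i ≤ n
          unfold myfib
          omega
        · show n < myfib (i + 1)
          have hE : Nat.fib (i + 1 + 2) = Nat.fib (i + 3) := rfl
          unfold myfib
          omega
      rw [hmx]
      unfold myfib
      rfl

theorem greedyLoop_eq : ∀ (fuel n : Nat) (c : Int), n ≤ fuel →
    greedyLoop (n : Int) c fuel = c + (gspec n : Int) := by
  intro fuel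
  induction fuel with
  | zero =>
    intro n c h
    have : n = 0 := by omega
    subst this
    simp [greedyLoop, gspec_zero]
  | succ fuel ih =>
    intro n c h
    show (if (0 : Int) < (n : Int) then _ else _) = _
    rcases Nat.eq_zero_or_pos n with h0 | h0
    · subst h0
      rw [if_neg (by norm_num)]
      simp [gspec_zero]
    · rw [if_pos (by exact_mod_cast h0)]
      have htn : ((n : Int)).toNat = n := Int.toNat_natCast n
      have hone : ((1 : Int)) = ((Nat.fib 1 : Nat) : Int) := by norm_num
      have hone2 : ((1 : Int)) = ((Nat.fib 2 : Nat) : Int) := by norm_num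
      have hinner : fibInner (n : Int) 1 1 ((n : Int)).toNat = (myfib (Mx n) : Int) := by
        rw [htn]
        rw [show ((1 : Int)) = ((Nat.fib 1 : Nat) : Int) from by norm_num]
        nth_rewrite 2 [show ((Nat.fib 1 : Nat) : Int) = ((Nat.fib 2 : Nat) : Int) from by norm_num]
        exact fibInner_eq n 0 n h0 (by simpa using h0) (by omega)
      rw [hinner]
      have hle : myfib (Mx n) ≤ n := myfib_Mx_le h0
      have hsub : (n : Int) - (myfib (Mx n) : Int) = ((n - myfib (Mx n) : Nat) : Int) := by
        omega
      rw [hsub]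
      rw [ih (n - myfib (Mx n)) (c + 1) (by have := myfib_pos (Mx n); omega)]
      rw [gspec_eq h0]
      push_cast
      ring

theorem altB_eq {k : Int} (h : 1 ≤ k) : findMinFibonacciNumbers_alt k = (gspec k.toNat : Int) := by
  unfold findMinFibonacciNumbers_alt
  have hk : k = ((k.toNat : Nat) : Int) := by omega
  rw [hk]
  rw [show ((k.toNat : Nat) : Int).toNat = k.toNat from Int.toNat_natCast _]
  rw [greedyLoop_eq (k.toNat + 1) k.toNat 0 (by omega)]
  simp

-- ===== port A = gspec =====

theorem fibSeqLoop_mem_aux {k : Int} (_hk : 1 ≤ k) :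
    ∀ (fuel i : Nat) (seq : List Int), (Nat.fib (i + 2) : Int) ≤ k →
      (k - Nat.fib (i + 2)).toNat ≤ fuel →
      ∀ x, x ∈ fibSeqLoop k (Nat.fib (i + 1) : Int) (Nat.fib (i + 2) : Int) seq fuel ↔
        x ∈ seq ∨ ∃ m, i + 3 ≤ m ∧ x = (Nat.fib m : Int) ∧ x ≤ k := by
  intro fuel
  induction fuel with
  | zero =>
    intro i seq h2 h3 x
    simp only [fibSeqLoop]
    constructor
    · exact Or.inl
    · rintro (hx | ⟨m, hm, rfl, hle⟩)
      · exact hx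
      · exfalso
        have hmono : Nat.fib (i + 3) ≤ Nat.fib m := Nat.fib_mono hm
        have hf3 : Nat.fib (i + 3) = Nat.fib (i + 1) + Nat.fib (i + 2) := Nat.fib_add_two
        have hp : 1 ≤ Nat.fib (i + 1) := Nat.fib_pos.mpr (by omega)
        omega
  | succ fuel ih =>
    intro i seq h2 h3 x
    show x ∈ (if (Nat.fib (i + 1) : Int) + (Nat.fib (i + 2) : Int) ≤ k then
      fibSeqLoop k (Nat.fib (i + 2) : Int) ((Nat.fib (i + 1) : Int) + (Nat.fib (i + 2) : Int))
        (seq ++ [(Nat.fib (i + 1) : Int) + (Nat.fib (i + 2) : Int)]) fuel else seq) ↔ _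
    have hf3 : Nat.fib (i + 3) = Nat.fib (i + 1) + Nat.fib (i + 2) := Nat.fib_add_two
    have hp : 1 ≤ Nat.fib (i + 1) := Nat.fib_pos.mpr (by omega)
    by_cases hc : (Nat.fib (i + 3) : Int) ≤ k
    · rw [if_pos (by push_cast [hf3] at hc ⊢; omega)]
      have hcast : (Nat.fib (i + 1) : Int) + (Nat.fib (i + 2) : Int) = ((Nat.fib (i + 3) : Nat) : Int) := by
        push_cast [hf3]
        ring
      rw [hcast]
      have hih := ih (i + 1) (seq ++ [((Nat.fib (i + 3) : Nat) : Int)])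
      rw [show i + 1 + 1 = i + 2 from rfl, show i + 1 + 2 = i + 3 from rfl,
        show i + 1 + 3 = i + 4 from rfl] at hih
      rw [hih hc (by omega) x]
      constructor
      · rintro (hx | ⟨m, hm, rfl, hle⟩)
        · rcases List.mem_append.mp hx with hx | hx
          · exact Or.inl hx
          · refine Or.inr ⟨i + 3, by omega, List.mem_singleton.mp hx ▸ rfl, ?_⟩
            rw [List.mem_singleton.mp hx]
            exact hc
        · exact Or.inr ⟨m, by omega, rfl, hle⟩
      · rintro (hx | ⟨m, hm, rfl, hle⟩)
        · exact Or.inl (List.mem_append.mpr (Or.inl hx))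
        · by_cases hm3 : m = i + 3
          · subst hm3
            exact Or.inl (List.mem_append.mpr (Or.inr (List.mem_singleton.mpr rfl)))
          · exact Or.inr ⟨m, by omega, rfl, hle⟩
    · rw [if_neg (by push_cast [hf3] at hc ⊢; omega)]
      constructor
      · exact Or.inl
      · rintro (hx | ⟨m, hm, rfl, hle⟩)
        · exact hx
        · exfalso
          have hmono : Nat.fib (i + 3) ≤ Nat.fib m := Nat.fib_mono hm
          omega

theorem fibSeq_mem {k : Int} (h : 1 ≤ k) :
    ∀ x, x ∈ fibSeqLoop k 1 1 [1] k.toNat ↔ ∃ j, x = (myfib j : Int) ∧ x ≤ k := by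
  intro x
  have hb : ((Nat.fib 2 : Nat) : Int) ≤ k := by
    rw [show ((Nat.fib 2 : Nat) : Int) = 1 from by norm_num]
    omega
  have hfuel : (k - ((Nat.fib 2 : Nat) : Int)).toNat ≤ k.toNat := by
    rw [show ((Nat.fib 2 : Nat) : Int) = 1 from by norm_num]
    omega
  have hgoal := fibSeqLoop_mem_aux h k.toNat 0 [1] hb hfuel x
  rw [show ((Nat.fib 1 : Nat) : Int) = 1 from by norm_num,
    show ((Nat.fib 2 : Nat) : Int) = 1 from by norm_num] at hgoal
  rw [hgoal]
  constructor
  · rintro (hx | ⟨m, hm, rfl, hle⟩)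
    · refine ⟨0, ?_, ?_⟩
      · rw [List.mem_singleton.mp hx]
        decide
      · rw [List.mem_singleton.mp hx]
        omega
    · refine ⟨m - 2, ?_, hle⟩
      have : myfib (m - 2) = Nat.fib m := by
        unfold myfib
        congr 1
        omega
      rw [this]
  · rintro ⟨j, rfl, hle⟩
    rcases Nat.eq_zero_or_pos j with h0 | h0
    · subst h0
      exact Or.inl (List.mem_singleton.mpr (by decide))
    · refine Or.inr ⟨j + 2, by omega, ?_, hle⟩
      unfold myfib
      rfl

-- invariant predicates for the BFS
def GenP (fibSeq : List Int) (fibSet : PySem.Set Int) (needsL : List Int) (x : Int) : Prop :=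
  1 ≤ x ∧ x ∉ fibSet ∧ ∃ need ∈ needsL, ∃ f ∈ fibSeq, x = need - f

theorem innerA_none {fibSet : PySem.Set Int} {need : Int} :
    ∀ (fibs : List Int) (v nn : PySem.Set Int), (∀ x ∈ v, x ∉ fibSet) →
      (innerA fibSet need fibs v nn = none ↔ ∃ f ∈ fibs, 1 ≤ need - f ∧ (need - f) ∈ fibSet) := by
  intro fibs
  induction fibs with
  | nil => intro v nn hv; simp [innerA]
  | cons f fs ih =>
    intro v nn hv
    show (if need - f ≤ 0 ∨ (need - f) ∈ v then innerA fibSet need fs v nn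
      else if (need - f) ∈ fibSet then none
      else innerA fibSet need fs (PySem.Set.add v (need - f)) (PySem.Set.add nn (need - f))) = none ↔ _
    split_ifs with h1 h2
    · rw [ih v nn hv]
      simp only [List.mem_cons]
      constructor
      · rintro ⟨g, hg, hge, hgf⟩
        exact ⟨g, Or.inr hg, hge, hgf⟩
      · rintro ⟨g, hg | hg, hge, hgf⟩
        · subst hg
          rcases h1 with h1 | h1
          · omega
          · exact absurd hgf (hv _ h1)
        · exact ⟨g, hg, hge, hgf⟩
    · simp only [List.mem_cons, true_iff]
      exact ⟨f, Or.inl rfl, by omega, h2⟩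
    · rw [ih (PySem.Set.add v (need - f)) (PySem.Set.add nn (need - f)) (by
        intro x hx
        rcases (PySem.Set.mem_add v (need - f) x).mp hx with hx | hx
        · exact hv x hx
        · subst hx; exact h2)]
      simp only [List.mem_cons]
      constructor
      · rintro ⟨g, hg, hge, hgf⟩
        exact ⟨g, Or.inr hg, hge, hgf⟩
      · rintro ⟨g, hg | hg, hge, hgf⟩
        · subst hg; exact absurd hgf h2
        · exact ⟨g, hg, hge, hgf⟩

theorem innerA_some {fibSet : PySem.Set Int} {need : Int} :
    ∀ (fibs : List Int) (v nn v' nn' : PySem.Set Int), (∀ x ∈ v, x ∉ fibSet) →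
      innerA fibSet need fibs v nn = some (v', nn') →
      (∀ x, x ∈ v' ↔ x ∈ v ∨ GenP fibs fibSet [need] x) ∧
      (∀ x, x ∈ nn' ↔ x ∈ nn ∨ (GenP fibs fibSet [need] x ∧ x ∉ v)) := by
  intro fibs
  induction fibs with
  | nil =>
    intro v nn v' nn' hv h
    simp only [innerA, Option.some.injEq, Prod.mk.injEq] at h
    obtain ⟨rfl, rfl⟩ := h
    simp [GenP]
  | cons f fs ih =>
    intro v nn v' nn' hv h
    rw [show innerA fibSet need (f :: fs) v nn =
      (if need - f ≤ 0 ∨ (need - f) ∈ v then innerA fibSet need fs v nn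
      else if (need - f) ∈ fibSet then none
      else innerA fibSet need fs (PySem.Set.add v (need - f)) (PySem.Set.add nn (need - f)))
      from rfl] at h
    split_ifs at h with h1 h2
    · obtain ⟨hvv, hnn⟩ := ih v nn v' nn' hv h
      constructor
      · intro x
        rw [hvv x]
        simp only [GenP, List.mem_cons, List.not_mem_nil, or_false]
        constructor
        · rintro (hx | ⟨hx1, hx2, nd, rfl, g, hg, rfl⟩)
          · exact Or.inl hx
          · exact Or.inr ⟨hx1, hx2, _, rfl, g, Or.inr hg, rfl⟩
        · rintro (hx | ⟨hx1, hx2, nd, rfl, g, (rfl | hg), rfl⟩)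
          · exact Or.inl hx
          · rcases h1 with h1 | h1
            · omega
            · exact Or.inl h1
          · exact Or.inr ⟨hx1, hx2, _, rfl, g, hg, rfl⟩
      · intro x
        rw [hnn x]
        simp only [GenP, List.mem_cons, List.not_mem_nil, or_false]
        constructor
        · rintro (hx | ⟨⟨hx1, hx2, nd, rfl, g, hg, rfl⟩, hx3⟩)
          · exact Or.inl hx
          · exact Or.inr ⟨⟨hx1, hx2, _, rfl, g, Or.inr hg, rfl⟩, hx3⟩
        · rintro (hx | ⟨⟨hx1, hx2, nd, rfl, g, (rfl | hg), rfl⟩, hx3⟩)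
          · exact Or.inl hx
          · rcases h1 with h1 | h1
            · omega
            · exact absurd h1 hx3
          · exact Or.inr ⟨⟨hx1, hx2, _, rfl, g, hg, rfl⟩, hx3⟩
    · have h1' : 1 ≤ need - f := by omega
      obtain ⟨hvv, hnn⟩ := ih (PySem.Set.add v (need - f)) (PySem.Set.add nn (need - f)) v' nn'
        (by
          intro x hx
          rcases (PySem.Set.mem_add v (need - f) x).mp hx with hx | hx
          · exact hv x hx
          · subst hx; exact h2) h
      constructor
      · intro x
        rw [hvv x, PySem.Set.mem_add]
        simp only [GenP, List.mem_cons, List.not_mem_nil, or_false]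
        constructor
        · rintro ((hx | rfl) | ⟨hx1, hx2, nd, rfl, g, hg, rfl⟩)
          · exact Or.inl hx
          · exact Or.inr ⟨h1', h2, _, rfl, f, Or.inl rfl, rfl⟩
          · exact Or.inr ⟨hx1, hx2, _, rfl, g, Or.inr hg, rfl⟩
        · rintro (hx | ⟨hx1, hx2, nd, rfl, g, (rfl | hg), rfl⟩)
          · exact Or.inl (Or.inl hx)
          · exact Or.inl (Or.inr rfl)
          · exact Or.inr ⟨hx1, hx2, _, rfl, g, hg, rfl⟩
      · intro x
        rw [hnn x, PySem.Set.mem_add, PySem.Set.mem_add]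
        simp only [GenP, List.mem_cons, List.not_mem_nil, or_false]
        constructor
        · rintro ((hx | rfl) | ⟨⟨hx1, hx2, nd, rfl, g, hg, rfl⟩, hx3⟩)
          · exact Or.inl hx
          · refine Or.inr ⟨⟨h1', h2, _, rfl, f, Or.inl rfl, rfl⟩, ?_⟩
            intro hmem
            exact h1 (Or.inr hmem)
          · refine Or.inr ⟨⟨hx1, hx2, _, rfl, g, Or.inr hg, rfl⟩, ?_⟩
            intro hmem
            exact hx3 (Or.inl hmem)
        · rintro (hx | ⟨⟨hx1, hx2, nd, rfl, g, (rfl | hg), rfl⟩, hx3⟩)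
          · exact Or.inl (Or.inl hx)
          · exact Or.inl (Or.inr rfl)
          · by_cases hxn : nd - g = nd - f
            · exact Or.inl (Or.inr hxn)
            · refine Or.inr ⟨⟨hx1, hx2, _, rfl, g, hg, rfl⟩, ?_⟩
              rintro (hmem | hmem)
              · exact hx3 hmem
              · exact hxn hmem

theorem GenP_cons {fibs : List Int} {fibSet : PySem.Set Int} {nd : Int} {rest : List Int} {x : Int} :
    GenP fibs fibSet (nd :: rest) x ↔ GenP fibs fibSet [nd] x ∨ GenP fibs fibSet rest x := by
  unfold GenP
  constructor
  · rintro ⟨h1, h2, nd', hnd, hrest⟩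
    rcases List.mem_cons.mp hnd with rfl | hmem
    · exact Or.inl ⟨h1, h2, nd', List.mem_singleton.mpr rfl, hrest⟩
    · exact Or.inr ⟨h1, h2, nd', hmem, hrest⟩
  · rintro (⟨h1, h2, nd', hnd, hrest⟩ | ⟨h1, h2, nd', hnd, hrest⟩)
    · exact ⟨h1, h2, nd', List.mem_cons.mpr (Or.inl (List.mem_singleton.mp hnd)), hrest⟩
    · exact ⟨h1, h2, nd', List.mem_cons.mpr (Or.inr hnd), hrest⟩

theorem outerA_none {fibSeq : List Int} {fibSet : PySem.Set Int} :
    ∀ (needsL : List Int) (v nn : PySem.Set Int), (∀ x ∈ v, x ∉ fibSet) →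
      (outerA fibSeq fibSet needsL v nn = none ↔
        ∃ need ∈ needsL, ∃ f ∈ fibSeq, 1 ≤ need - f ∧ (need - f) ∈ fibSet) := by
  intro needsL
  induction needsL with
  | nil => intro v nn hv; simp [outerA]
  | cons need rest ih =>
    intro v nn hv
    show (match innerA fibSet need fibSeq v nn with
      | none => none
      | some (v1, nn1) => outerA fibSeq fibSet rest v1 nn1) = none ↔ _
    cases hinner : innerA fibSet need fibSeq v nn with
    | none =>
      simp only [List.mem_cons, true_iff]
      obtain ⟨f, hf, hf1, hf2⟩ := (innerA_none fibSeq v nn hv).mp hinner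
      exact ⟨need, Or.inl rfl, f, hf, hf1, hf2⟩
    | some p =>
      obtain ⟨v1, nn1⟩ := p
      have hv1 : ∀ x ∈ v1, x ∉ fibSet := by
        intro x hx
        rcases ((innerA_some fibSeq v nn v1 nn1 hv hinner).1 x).mp hx with hx | hx
        · exact hv x hx
        · exact hx.2.1
      rw [ih v1 nn1 hv1]
      simp only [List.mem_cons]
      constructor
      · rintro ⟨nd, hnd, f, hf, hf1, hf2⟩
        exact ⟨nd, Or.inr hnd, f, hf, hf1, hf2⟩
      · rintro ⟨nd, rfl | hnd, f, hf, hf1, hf2⟩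
        · exact absurd hinner (by
            rw [(innerA_none fibSeq v nn hv).mpr ⟨f, hf, hf1, hf2⟩]
            simp)
        · exact ⟨nd, hnd, f, hf, hf1, hf2⟩

theorem outerA_some {fibSeq : List Int} {fibSet : PySem.Set Int} :
    ∀ (needsL : List Int) (v nn v' nn' : PySem.Set Int), (∀ x ∈ v, x ∉ fibSet) →
      outerA fibSeq fibSet needsL v nn = some (v', nn') →
      (∀ x, x ∈ v' ↔ x ∈ v ∨ GenP fibSeq fibSet needsL x) ∧
      (∀ x, x ∈ nn' ↔ x ∈ nn ∨ (GenP fibSeq fibSet needsL x ∧ x ∉ v)) := by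
  intro needsL
  induction needsL with
  | nil =>
    intro v nn v' nn' hv h
    simp only [outerA, Option.some.injEq, Prod.mk.injEq] at h
    obtain ⟨rfl, rfl⟩ := h
    simp [GenP]
  | cons need rest ih =>
    intro v nn v' nn' hv h
    rw [show outerA fibSeq fibSet (need :: rest) v nn =
      (match innerA fibSet need fibSeq v nn with
      | none => none
      | some (v1, nn1) => outerA fibSeq fibSet rest v1 nn1) from rfl] at h
    cases hinner : innerA fibSet need fibSeq v nn with
    | none =>
      rw [hinner] at h
      simp at h
    | some p =>
      obtain ⟨v1, nn1⟩ := p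
      rw [hinner] at h
      have h' : outerA fibSeq fibSet rest v1 nn1 = some (v', nn') := h
      obtain ⟨hi1, hi2⟩ := innerA_some fibSeq v nn v1 nn1 hv hinner
      have hv1 : ∀ x ∈ v1, x ∉ fibSet := by
        intro x hx
        rcases (hi1 x).mp hx with hx | hx
        · exact hv x hx
        · exact hx.2.1
      obtain ⟨ho1, ho2⟩ := ih v1 nn1 v' nn' hv1 h'
      constructor
      · intro x
        have hgc := GenP_cons (fibs := fibSeq) (fibSet := fibSet) (nd := need) (rest := rest) (x := x)
        rw [ho1 x, hi1 x]
        tauto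
      · intro x
        have hgc := GenP_cons (fibs := fibSeq) (fibSet := fibSet) (nd := need) (rest := rest) (x := x)
        rw [ho2 x, hi2 x]
        constructor
        · rintro (((hx | ⟨hg, hxv⟩) | ⟨hg, hxv1⟩))
          · exact Or.inl hx
          · exact Or.inr ⟨hgc.mpr (Or.inl hg), hxv⟩
          · refine Or.inr ⟨hgc.mpr (Or.inr hg), fun hxv => hxv1 ((hi1 x).mpr (Or.inl hxv))⟩
        · rintro (hx | ⟨hg, hxv⟩)
          · exact Or.inl (Or.inl hx)
          · rcases hgc.mp hg with hg | hg
            · exact Or.inl (Or.inr ⟨hg, hxv⟩)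
            · by_cases hxv1 : x ∈ v1
              · rcases (hi1 x).mp hxv1 with hx1 | hx1
                · exact absurd hx1 hxv
                · exact Or.inl (Or.inr ⟨hx1, hxv⟩)
              · exact Or.inr ⟨hg, hxv1⟩

-- residuals reachable in exactly j subtractions of elements of fibSeq
def RSk (fibSeq : List Int) (k : Int) (j : Nat) (x : Int) : Prop :=
  ∃ l : List Int, l.length = j ∧ (∀ f ∈ l, f ∈ fibSeq) ∧ x = k - l.sum

theorem rsk_reps_aux {k : Int} (hk : 1 ≤ k) :
    ∀ l : List Int, (∀ f ∈ l, f ∈ fibSeqLoop k 1 1 [1] k.toNat) →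
      ∃ L : List Nat, L.length = l.length ∧ ((L.map myfib).sum : Int) = l.sum := by
  intro l
  induction l with
  | nil => intro _; exact ⟨[], rfl, by simp⟩
  | cons f fs ih =>
    intro hmem
    obtain ⟨j, hj, _⟩ := (fibSeq_mem hk f).mp (hmem f List.mem_cons_self)
    obtain ⟨L, hL1, hL2⟩ := ih (fun g hg => hmem g (List.mem_cons_of_mem f hg))
    refine ⟨j :: L, by simp [hL1], ?_⟩
    simp only [List.map_cons, List.sum_cons]
    push_cast
    rw [← hj, ← hL2]
    push_cast
    ring

theorem rsk_reps {k : Int} (hk : 1 ≤ k) {j : Nat} {x : Int}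
    (hx : RSk (fibSeqLoop k 1 1 [1] k.toNat) k j x) :
    ∃ L : List Nat, L.length = j ∧ ((L.map myfib).sum : Int) = k - x := by
  obtain ⟨l, hlen, hmem, rfl⟩ := hx
  obtain ⟨L, hL1, hL2⟩ := rsk_reps_aux hk l hmem
  exact ⟨L, by omega, by rw [hL2]; ring⟩

-- membership in the fib set forces greedy count 1
theorem mem_fibset_gspec {k x : Int} (hk : 1 ≤ k)
    (hx : x ∈ PySem.Set.ofList (fibSeqLoop k 1 1 [1] k.toNat)) : gspec x.toNat = 1 := by
  rw [PySem.Set.mem_ofList] at hx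
  obtain ⟨j, rfl, _⟩ := (fibSeq_mem hk x).mp hx
  rw [Int.toNat_natCast]
  exact gspec_myfib j

-- the main BFS run lemma
theorem bfs_run {k : Int} (hk : 1 ≤ k) :
    ∀ (fuel i : Nat) (N V : PySem.Set Int),
      gspec k.toNat ≤ fuel + i + 1 →
      (∀ x ∈ N, RSk (fibSeqLoop k 1 1 [1] k.toNat) k i x ∧ 1 ≤ x ∧
        x ∉ PySem.Set.ofList (fibSeqLoop k 1 1 [1] k.toNat)) →
      (∀ x ∈ V, (∃ j, j ≤ i ∧ RSk (fibSeqLoop k 1 1 [1] k.toNat) k j x) ∧ 1 ≤ x ∧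
        x ∉ PySem.Set.ofList (fibSeqLoop k 1 1 [1] k.toNat)) →
      ((X k.toNat i : Nat) : Int) ∈ N → i + 2 ≤ gspec k.toNat →
      bfsA (fibSeqLoop k 1 1 [1] k.toNat) (PySem.Set.ofList (fibSeqLoop k 1 1 [1] k.toNat))
        N V ((i : Int) + 1) fuel = (gspec k.toNat : Int) := by
  intro fuel
  induction fuel with
  | zero =>
    intro i N V hfuel _ _ _ hi
    exfalso
    omega
  | succ fuel ih =>
    intro i N V hfuel hN hV hx hi
    have hkn : k = ((k.toNat : Nat) : Int) := by omega
    have hVS : ∀ x ∈ V, x ∉ PySem.Set.ofList (fibSeqLoop k 1 1 [1] k.toNat) :=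
      fun x hxv => (hV x hxv).2.2
    show (match outerA (fibSeqLoop k 1 1 [1] k.toNat)
        (PySem.Set.ofList (fibSeqLoop k 1 1 [1] k.toNat)) N V PySem.Set.empty with
      | none => ((i : Int) + 1) + 1
      | some (v, nn) => bfsA (fibSeqLoop k 1 1 [1] k.toNat)
          (PySem.Set.ofList (fibSeqLoop k 1 1 [1] k.toNat)) nn v (((i : Int) + 1) + 1) fuel)
      = (gspec k.toNat : Int)
    cases hout : outerA (fibSeqLoop k 1 1 [1] k.toNat)
        (PySem.Set.ofList (fibSeqLoop k 1 1 [1] k.toNat)) N V PySem.Set.empty with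
    | none =>
      -- the `return steps` was hit: some residual minus a fib is itself a fib
      obtain ⟨need, hneed, f, hf, hge1, hfib⟩ :=
        (outerA_none N V PySem.Set.empty hVS).mp hout
      obtain ⟨L, hL1, hL2⟩ := rsk_reps hk (hN need hneed).1
      obtain ⟨jf, hjf, _⟩ := (fibSeq_mem hk f).mp hf
      rw [PySem.Set.mem_ofList] at hfib
      obtain ⟨j0, hj0, _⟩ := (fibSeq_mem hk (need - f)).mp hfib
      have hreps : repsN (i + 2) k.toNat := by
        refine ⟨L ++ [jf, j0], by simp [hL1], ?_⟩
        simp only [List.map_append, List.sum_append, List.map_cons, List.map_nil,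
          List.sum_cons, List.sum_nil]
        omega
      have hle := gspec_min hreps
      have hg : gspec k.toNat = i + 2 := by omega
      rw [hg]
      push_cast
      ring
    | some p =>
      obtain ⟨v', nn'⟩ := p
      -- the return condition cannot hold yet, so we are strictly before the last level
      have hlt : i + 3 ≤ gspec k.toNat := by
        rcases Nat.lt_or_ge (i + 2) (gspec k.toNat) with h | h
        · omega
        · exfalso
          have hg : gspec k.toNat = i + 2 := by omega
          have hX1 : 1 ≤ X k.toNat (i + 1) := X_pos (by omega)
          have hXle : X k.toNat (i + 1) ≤ k.toNat := X_le (i + 1)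
          have hgX : gspec (X k.toNat (i + 1)) = 1 := by
            rw [gspec_X (i + 1) (by omega), hg]
            omega
          obtain ⟨jx, hjx⟩ := gspec_eq_one hgX
          have hfmem : ((myfib (Mx (X k.toNat i)) : Nat) : Int) ∈ fibSeqLoop k 1 1 [1] k.toNat := by
            rw [fibSeq_mem hk]
            refine ⟨Mx (X k.toNat i), rfl, ?_⟩
            have h1 : myfib (Mx (X k.toNat i)) ≤ X k.toNat i := myfib_Mx_le (X_pos (by omega))
            have h2 : X k.toNat i ≤ k.toNat := X_le i
            omega
          have hcond := (outerA_none N V PySem.Set.empty hVS).mpr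
            ⟨((X k.toNat i : Nat) : Int), hx, ((myfib (Mx (X k.toNat i)) : Nat) : Int), hfmem, ?_, ?_⟩
          · rw [hcond] at hout
            simp at hout
          · -- 1 ≤ X i - myfib (Mx (X i))
            have hstep : ((X k.toNat i : Nat) : Int) - ((myfib (Mx (X k.toNat i)) : Nat) : Int)
                = ((X k.toNat (i + 1) : Nat) : Int) := by
              have h1 : myfib (Mx (X k.toNat i)) ≤ X k.toNat i := myfib_Mx_le (X_pos (by omega))
              show _ = ((X k.toNat i - myfib (Mx (X k.toNat i)) : Nat) : Int)
              omega
            rw [hstep]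
            omega
          · have hstep : ((X k.toNat i : Nat) : Int) - ((myfib (Mx (X k.toNat i)) : Nat) : Int)
                = ((X k.toNat (i + 1) : Nat) : Int) := by
              have h1 : myfib (Mx (X k.toNat i)) ≤ X k.toNat i := myfib_Mx_le (X_pos (by omega))
              show _ = ((X k.toNat i - myfib (Mx (X k.toNat i)) : Nat) : Int)
              omega
            rw [hstep, PySem.Set.mem_ofList, fibSeq_mem hk]
            refine ⟨jx, by exact_mod_cast congrArg (fun m => ((m : Nat) : Int)) hjx, ?_⟩
            have h2 : X k.toNat (i + 1) ≤ k.toNat := X_le (i + 1)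
            omega
      -- characterize the new sets
      obtain ⟨ho1, ho2⟩ := outerA_some N V PySem.Set.empty v' nn' hVS hout
      have hGen : ∀ x, GenP (fibSeqLoop k 1 1 [1] k.toNat)
          (PySem.Set.ofList (fibSeqLoop k 1 1 [1] k.toNat)) N x →
          RSk (fibSeqLoop k 1 1 [1] k.toNat) k (i + 1) x ∧ 1 ≤ x ∧
            x ∉ PySem.Set.ofList (fibSeqLoop k 1 1 [1] k.toNat) := by
        rintro x ⟨hx1, hx2, nd, hnd, f, hf, rfl⟩
        obtain ⟨l, hl1, hl2, hl3⟩ := (hN nd hnd).1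
        exact ⟨⟨l ++ [f], by simp [hl1], by
          intro g hg
          rcases List.mem_append.mp hg with hg | hg
          · exact hl2 g hg
          · rw [List.mem_singleton.mp hg]
            exact hf, by rw [List.sum_append]; simp; omega⟩, hx1, hx2⟩
      have hN' : ∀ x ∈ nn', RSk (fibSeqLoop k 1 1 [1] k.toNat) k (i + 1) x ∧ 1 ≤ x ∧
          x ∉ PySem.Set.ofList (fibSeqLoop k 1 1 [1] k.toNat) := by
        intro x hxm
        rcases (ho2 x).mp hxm with hxm | ⟨hxm, _⟩
        · exact absurd hxm (by simp [PySem.Set.empty])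
        · exact hGen x hxm
      have hV' : ∀ x ∈ v', (∃ j, j ≤ i + 1 ∧ RSk (fibSeqLoop k 1 1 [1] k.toNat) k j x) ∧ 1 ≤ x ∧
          x ∉ PySem.Set.ofList (fibSeqLoop k 1 1 [1] k.toNat) := by
        intro x hxm
        rcases (ho1 x).mp hxm with hxm | hxm
        · obtain ⟨⟨j, hj1, hj2⟩, hb, hc⟩ := hV x hxm
          exact ⟨⟨j, by omega, hj2⟩, hb, hc⟩
        · obtain ⟨h1, h2, h3⟩ := hGen x hxm
          exact ⟨⟨i + 1, le_refl _, h1⟩, h2, h3⟩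
      -- the greedy chain advances into the new needs set
      have hXnotV : ((X k.toNat (i + 1) : Nat) : Int) ∉ V := by
        intro hmem
        obtain ⟨⟨j, hj1, hj2⟩, _, _⟩ := hV _ hmem
        obtain ⟨L, hL1, hL2⟩ := rsk_reps hk hj2
        obtain ⟨L2, hL21, hL22⟩ := repsN_X (n := k.toNat) (t := i + 1) (by omega)
        have hXle : X k.toNat (i + 1) ≤ k.toNat := X_le (i + 1)
        have hreps : repsN (j + (gspec k.toNat - (i + 1))) k.toNat := by
          refine ⟨L ++ L2, by simp [hL1, hL21], ?_⟩
          simp only [List.map_append, List.sum_append]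
          omega
        have := gspec_min hreps
        omega
      have hXmem : ((X k.toNat (i + 1) : Nat) : Int) ∈ nn' := by
        have hX1 : 1 ≤ X k.toNat (i + 1) := X_pos (by omega)
        have hXle : X k.toNat (i + 1) ≤ k.toNat := X_le (i + 1)
        have hXi1 : myfib (Mx (X k.toNat i)) ≤ X k.toNat i := myfib_Mx_le (X_pos (by omega))
        refine (ho2 _).mpr (Or.inr ⟨⟨by omega, ?_, ((X k.toNat i : Nat) : Int), hx,
          ((myfib (Mx (X k.toNat i)) : Nat) : Int), ?_, ?_⟩, hXnotV⟩)
        · -- X (i+1) is not a Fibonacci number (its greedy count is ≥ 2)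
          intro hmem
          have h1 := mem_fibset_gspec hk hmem
          rw [Int.toNat_natCast] at h1
          rw [gspec_X (i + 1) (by omega)] at h1
          omega
        · rw [fibSeq_mem hk]
          refine ⟨Mx (X k.toNat i), rfl, ?_⟩
          have h2 : X k.toNat i ≤ k.toNat := X_le i
          omega
        · have hdef : X k.toNat (i + 1) = X k.toNat i - myfib (Mx (X k.toNat i)) := rfl
          rw [hdef]
          omega
      -- recurse
      have hrec := ih (i + 1) nn' v' (by omega) hN' hV' hXmem (by omega)
      rw [show (((i + 1 : Nat) : Nat) : Int) + 1 = ((i : Int) + 1) + 1 from by push_cast; ring] at hrec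
      exact hrec

theorem portA_eq {k : Int} (h : 1 ≤ k) : findMinFibonacciNumbers k = (gspec k.toNat : Int) := by
  unfold findMinFibonacciNumbers
  by_cases hmem : k ∈ PySem.Set.ofList (fibSeqLoop k 1 1 [1] k.toNat)
  · rw [if_pos hmem]
    have := mem_fibset_gspec h hmem
    rw [this]
    norm_num
  · rw [if_neg hmem]
    have hg2 : 2 ≤ gspec k.toNat := by
      have h1 : 1 ≤ gspec k.toNat := gspec_pos (by omega)
      rcases Nat.lt_or_ge (gspec k.toNat) 2 with h2 | h2
      · exfalso
        have hg1 : gspec k.toNat = 1 := by omega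
        obtain ⟨j, hj⟩ := gspec_eq_one hg1
        refine hmem ?_
        rw [PySem.Set.mem_ofList, fibSeq_mem h]
        exact ⟨j, by omega, le_refl _⟩
      · exact h2
    have hrun := bfs_run h (k.toNat + 1) 0 (PySem.Set.ofList [k]) PySem.Set.empty
      (by have := gspec_le_self k.toNat; omega)
      (by
        intro x hx
        rw [PySem.Set.mem_ofList, List.mem_singleton] at hx
        subst hx
        exact ⟨⟨[], rfl, by simp, by simp⟩, h, hmem⟩)
      (by intro x hx; exact absurd hx (by simp [PySem.Set.empty]))
      (by
        rw [PySem.Set.mem_ofList, List.mem_singleton]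
        show ((X k.toNat 0 : Nat) : Int) = k
        show ((k.toNat : Nat) : Int) = k
        omega)
      (by omega)
    rw [show ((0 : Nat) : Int) + 1 = 1 from by norm_num] at hrun
    exact hrun

-- ===== VERDICT (by name: the statement is the Claim_ definition above) =====
theorem findMinFibonacciNumbers_spec : Claim_equal_findMinFibonacciNumbers := by
  intro k _ hpre
  unfold Spec_findMinFibonacciNumbers
  rw [portA_eq hpre, altB_eq hpre]
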